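-- pv_equiv track=rewrite | github.com/BenjaminIrwin/source-heideltime | heideltime_loader.py | _replace_spaces_outside_char_classes
-- ===== SOURCE A (Python) =====
-- from typing import Dict, List, Optional
--
-- def _replace_spaces_outside_char_classes(pattern: str) -> str:
--     parts: List[str] = []
--     in_class = False
--     escaped = False
--     for ch in pattern:
--         if escaped:
--             parts.append(ch)
--             escaped = False
--             continue
--         if ch == "\\":
--             parts.append(ch)
--             escaped = True
--             continue
--         if ch == "[":
--             in_class = True
--             parts.append(ch)
--             continue
--         if ch == "]":
--             in_class = False
--             parts.append(ch)
--             continue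
--         if ch == " " and not in_class:
--             parts.append(r"[\s]+")
--             continue
--         parts.append(ch)
--     return "".join(parts)
-- ===== SOURCE B (Python) =====
-- import re
--
-- # One stateless regex substitution: an escape pair, a whole character class
-- # (from an unescaped '[' to the first unescaped ']' or to end of string,
-- # tolerating a lone trailing backslash), or a bare space.  Only the bare
-- # space is rewritten; everything else is copied verbatim by the regex.
-- _TOKEN = re.compile(r"\\.|\[[^\]\\]*(?:\\.[^\]\\]*)*(?:\]|\\?$)| ", re.DOTALL)
--
-- def _replace_spaces_outside_char_classes(pattern: str) -> str:
--     return _TOKEN.sub(lambda m: r"[\s]+" if m.group() == " " else m.group(), pattern)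
-- ===== Notes on version B (the rewrite author's own statement) =====
-- stated objective: faster
-- what changed: B replaces A's per-character loop with two boolean state flags by a single stateless re.sub whose pattern consumes an escape pair, a whole character class (unescaped '[' up to the first unescaped ']' or end of string) or a bare space at once, rewriting only the bare space.
import Mathlib
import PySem

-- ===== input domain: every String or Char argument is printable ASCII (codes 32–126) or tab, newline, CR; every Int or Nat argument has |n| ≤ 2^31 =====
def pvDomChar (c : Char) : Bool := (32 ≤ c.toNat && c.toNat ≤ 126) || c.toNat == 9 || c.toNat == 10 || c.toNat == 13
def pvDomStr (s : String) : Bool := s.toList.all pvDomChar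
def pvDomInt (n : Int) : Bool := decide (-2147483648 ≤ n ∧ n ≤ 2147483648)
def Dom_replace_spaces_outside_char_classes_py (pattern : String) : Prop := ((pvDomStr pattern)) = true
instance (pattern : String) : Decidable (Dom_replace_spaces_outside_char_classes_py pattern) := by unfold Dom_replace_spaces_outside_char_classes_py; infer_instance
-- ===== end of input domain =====

-- B replaces A's per-character loop with boolean flags by one stateless regex
-- substitution that consumes an escape pair, a whole character class or a bare
-- space at a time, rewriting only the bare space (measured faster by the
-- timing run: the scan runs in the regex engine, not a Python loop).

-- ===== PORT A =====
-- parts is a List (List Char) (Python list of strings); state = (parts, in_class, escaped)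
def pyA_step : (List (List Char) × Bool × Bool) → Char → (List (List Char) × Bool × Bool)
  | (parts, inC, esc), ch =>
    if esc then (parts ++ [[ch]], inC, false)
    else if ch = '\\' then (parts ++ [[ch]], inC, true)
    else if ch = '[' then (parts ++ [[ch]], true, false)
    else if ch = ']' then (parts ++ [[ch]], false, false)
    else if ch = ' ' ∧ inC = false then (parts ++ [['[', '\\', 's', ']', '+']], inC, false)
    else (parts ++ [[ch]], inC, false)

def replace_spaces_outside_char_classes_py (pattern : String) : String :=
  String.ofList ((pattern.toList.foldl pyA_step ([], false, false)).1.flatten)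

-- ===== PORT B =====
-- Hand port of B's regex r"\\.|\[[^\]\\]*(?:\\.[^\]\\]*)*(?:\]|\\?$)| " under
-- re.sub: matching is deterministic here, so it is exact to transcribe it as a
-- recursive descent — pyClassTok consumes the body of the class alternative
-- (chars other than ']'/'\', escape pairs, up to ']' or (a lone '\' and) end),
-- returning (consumed, rest); pySub walks the string trying the alternatives
-- in order, copying unmatched characters through as re.sub does.
def pyClassTok : List Char → (List Char × List Char)
  | [] => ([], [])
  | ']' :: rest => ([']'], rest)
  | '\\' :: c :: rest =>
      let (b, r) := pyClassTok rest; ('\\' :: c :: b, r)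
  | c :: rest =>
      let (b, r) := pyClassTok rest; (c :: b, r)

lemma pyClassTok_snd_length : ∀ cs : List Char, (pyClassTok cs).2.length ≤ cs.length := by
  intro cs
  induction cs using pyClassTok.induct with
  | case1 => simp [pyClassTok]
  | case2 rest => simp [pyClassTok]
  | case3 c rest b r h ih => simp [pyClassTok, h] at ih ⊢; omega
  | case4 c rest h1 h2 b r h ih => simp [pyClassTok, h] at ih ⊢; omega

def pySub : List Char → List Char
  | [] => []
  | '\\' :: c :: rest => '\\' :: c :: pySub rest
  | '[' :: rest =>
      '[' :: ((pyClassTok rest).1 ++ pySub (pyClassTok rest).2)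
  | ' ' :: rest => '[' :: '\\' :: 's' :: ']' :: '+' :: pySub rest
  | c :: rest => c :: pySub rest
termination_by cs => cs.length
decreasing_by all_goals
  simp only [List.length_cons]
  have h := pyClassTok_snd_length rest
  omega

def replace_spaces_outside_char_classes_py_alt (pattern : String) : String :=
  String.ofList (pySub pattern.toList)

-- ===== PRECONDITION & SPEC =====
def Spec_replace_spaces_outside_char_classes_py (pattern : String) (out : String) : Prop := out = replace_spaces_outside_char_classes_py_alt pattern
instance (pattern : String) (out : String) : Decidable (Spec_replace_spaces_outside_char_classes_py pattern out) := by unfold Spec_replace_spaces_outside_char_classes_py; infer_instance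

-- ===== CLAIM (what is proved, stated in full; the proofs are below) =====
def Claim_equal_replace_spaces_outside_char_classes_py : Prop := ∀ (pattern : String), Dom_replace_spaces_outside_char_classes_py pattern → Spec_replace_spaces_outside_char_classes_py pattern (replace_spaces_outside_char_classes_py pattern)

-- ===== LEMMAS AND PROOFS =====
lemma pyA_step_acc (parts : List (List Char)) (inC esc : Bool) (c : Char) :
    pyA_step (parts, inC, esc) c =
      (parts ++ (pyA_step ([], inC, esc) c).1, (pyA_step ([], inC, esc) c).2) := by
  simp only [pyA_step]
  split_ifs <;> simp

lemma pyA_acc (cs : List Char) : ∀ (parts : List (List Char)) (inC esc : Bool),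
    cs.foldl pyA_step (parts, inC, esc) =
      (parts ++ (cs.foldl pyA_step ([], inC, esc)).1, (cs.foldl pyA_step ([], inC, esc)).2) := by
  induction cs with
  | nil => intro parts inC esc; simp [List.foldl]
  | cons c cs ih =>
    intro parts inC esc
    simp only [List.foldl_cons]
    rw [pyA_step_acc]
    rcases h : pyA_step ([], inC, esc) c with ⟨p1, b1, e1⟩
    simp only
    rw [ih (parts ++ p1), ih p1]
    simp [List.append_assoc]

-- main invariant, by strong induction on length: outside a class A's fold is
-- pySub; inside a class A's fold is the class token followed by pySub of the rest
lemma main_both (n : Nat) : ∀ cs : List Char, cs.length ≤ n →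
    ((cs.foldl pyA_step ([], false, false)).1.flatten = pySub cs ∧
     (cs.foldl pyA_step ([], true, false)).1.flatten =
       (pyClassTok cs).1 ++ pySub (pyClassTok cs).2) := by
  induction n with
  | zero =>
    intro cs h
    have : cs = [] := List.length_eq_zero_iff.mp (Nat.le_zero.mp h)
    subst this
    simp [List.foldl, pySub, pyClassTok]
  | succ n ih =>
    intro cs hlen
    cases cs with
    | nil => simp [List.foldl, pySub, pyClassTok]
    | cons c rest =>
      have hr : rest.length ≤ n := by simp at hlen; omega
      by_cases hbs : c = '\\'
      · subst hbs
        cases rest with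
        | nil =>
          constructor <;> simp [List.foldl, pyA_step, pySub, pyClassTok]
        | cons c' rest' =>
          have hr' : rest'.length ≤ n := by simp at hlen; omega
          obtain ⟨ih1, ih2⟩ := ih rest' hr'
          constructor
          · simp only [List.foldl_cons, pyA_step]
            norm_num
            rw [pyA_acc]
            simp [pySub, ih1]
          · simp only [List.foldl_cons, pyA_step]
            norm_num
            rw [pyA_acc]
            simp [pyClassTok, ih2]
      · obtain ⟨ih1, ih2⟩ := ih rest hr
        by_cases hb : c = '['
        · subst hb
          constructor
          · simp only [List.foldl_cons, pyA_step]
            norm_num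
            rw [pyA_acc]
            simp [pySub, ih2]
          · simp only [List.foldl_cons, pyA_step]
            norm_num
            rw [pyA_acc]
            simp [pyClassTok, ih2]
        · by_cases hc : c = ']'
          · subst hc
            constructor
            · simp only [List.foldl_cons, pyA_step]
              norm_num
              rw [pyA_acc]
              simp [pySub, ih1]
            · simp only [List.foldl_cons, pyA_step]
              norm_num
              rw [pyA_acc]
              simp [pyClassTok, ih1]
          · by_cases hs : c = ' '
            · subst hs
              constructor
              · simp only [List.foldl_cons, pyA_step]
                norm_num
                rw [pyA_acc]
                simp [pySub, ih1]
              · simp only [List.foldl_cons, pyA_step]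
                norm_num
                rw [pyA_acc]
                simp [pyClassTok, ih2]
            · constructor
              · simp only [List.foldl_cons, pyA_step]
                simp [hb, hc, hs, hbs]
                rw [pyA_acc]
                simp [pySub, hbs, ih1]
              · simp only [List.foldl_cons, pyA_step]
                simp [hb, hc, hs, hbs]
                rw [pyA_acc]
                simp [pyClassTok, hbs, ih2]

-- ===== VERDICT (by name: the statement is the Claim_ definition above) =====
theorem replace_spaces_outside_char_classes_py_spec : Claim_equal_replace_spaces_outside_char_classes_py := by
  intro pattern _
  unfold Spec_replace_spaces_outside_char_classes_py
  unfold replace_spaces_outside_char_classes_py replace_spaces_outside_char_classes_py_alt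
  rw [(main_both pattern.toList.length pattern.toList le_rfl).1]
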